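-- pv_equiv track=rewrite | github.com/kyuridenamida/atcoder-tools | core/FormatTokenizer.py | divide_consecutive_vars
-- ===== SOURCE A (Python) =====
-- def divide_consecutive_vars(text):
--     res_text = ""
--     i = 0
--     while i < len(text):
--         if text[i] == "_":
--             res_text += "_"
--             i += 1
--
--             if i < len(text) and text[i].isdigit():
--                 while i < len(text) and text[i].isdigit():
--                     res_text += text[i]
--                     i += 1
--             elif i < len(text) and text[i].isalpha():
--                 res_text += text[i]
--                 i += 1
--             if i < len(text) and text[i].isalpha():
--                 res_text += " "
--         else:
--             res_text += text[i]
--             i += 1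
--     return res_text
-- ===== SOURCE B (Python) =====
-- def _fix(s):
--     k = 0
--     while k < len(s) and s[k].isdigit():
--         k += 1
--     if k > 0:
--         if k < len(s) and s[k].isalpha():
--             return s[:k] + " " + s[k:]
--         return s
--     if len(s) >= 2 and s[0].isalpha() and s[1].isalpha():
--         return s[0] + " " + s[1:]
--     return s
--
--
-- def divide_consecutive_vars(text):
--     segs = text.split("_")
--     return segs[0] + "".join("_" + _fix(s) for s in segs[1:])
-- ===== Notes on version B (the rewrite author's own statement) =====
-- stated objective: faster
-- what changed: Replaced the manual while-loop index state machine that grows the result by repeated string concatenation with a split on the underscore separator, a small per-segment normalizer (a digit-run or single-letter head followed by a letter gets a space), and one join.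
import Mathlib
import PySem

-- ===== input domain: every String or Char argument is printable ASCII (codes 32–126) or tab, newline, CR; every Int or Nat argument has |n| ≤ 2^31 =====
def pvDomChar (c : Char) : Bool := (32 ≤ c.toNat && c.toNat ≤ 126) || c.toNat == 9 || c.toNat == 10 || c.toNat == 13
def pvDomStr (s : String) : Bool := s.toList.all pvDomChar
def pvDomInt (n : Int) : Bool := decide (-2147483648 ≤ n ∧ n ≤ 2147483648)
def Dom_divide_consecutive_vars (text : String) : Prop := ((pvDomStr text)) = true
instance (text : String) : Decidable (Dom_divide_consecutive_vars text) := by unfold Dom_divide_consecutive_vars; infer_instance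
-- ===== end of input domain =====

-- B replaces A's while-loop index state machine (repeated string concatenation) by split on underscore + a per-segment normalizer + join; measured faster in a timing run.

-- ===== PORT A =====
-- after the '_' is emitted, A consumes either the maximal digit run or one letter (the two inner branches)
def pvAStep (rest : List Char) : List Char × List Char :=
  match rest with
  | [] => ([], [])
  | d :: r =>
    if PySem.Chars.isdigit d then
      (rest.takeWhile PySem.Chars.isdigit, rest.dropWhile PySem.Chars.isdigit)
    else if PySem.Chars.isalpha d then ([d], r)
    else ([], rest)

lemma pvAStep_len (rest : List Char) : (pvAStep rest).2.length ≤ rest.length := by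
  unfold pvAStep
  match rest with
  | [] => simp
  | d :: r =>
    simp only
    split_ifs <;> simp
    exact List.Sublist.length_le (List.dropWhile_sublist _)

def divide_consecutive_vars_go : List Char → List Char
  | [] => []
  | c :: rest =>
    if c = '_' then
      let p := pvAStep rest
      '_' :: (p.1 ++ (match p.2.head? with
        | some a => if PySem.Chars.isalpha a then ' ' :: divide_consecutive_vars_go p.2
                    else divide_consecutive_vars_go p.2
        | none => divide_consecutive_vars_go p.2))
    else c :: divide_consecutive_vars_go rest
termination_by l => l.length
decreasing_by
  all_goals first
    | (have := pvAStep_len rest; simp at this ⊢; omega)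
    | simp

def divide_consecutive_vars (text : String) : String :=
  String.ofList (divide_consecutive_vars_go text.toList)

-- ===== PORT B =====
-- leading-digit-run counter (the k-advancing while loop of _fix)
def pvDigitRun : List Char → Nat
  | [] => 0
  | c :: r => if PySem.Chars.isdigit c then pvDigitRun r + 1 else 0

def pvFix (s : List Char) : List Char :=
  let k := pvDigitRun s
  if 0 < k then
    match (s.drop k).head? with
    | some c => if PySem.Chars.isalpha c then s.take k ++ ' ' :: s.drop k else s
    | none => s
  else
    match s with
    | a :: b :: t => if PySem.Chars.isalpha a && PySem.Chars.isalpha b then a :: ' ' :: b :: t else s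
    | _ => s

def divide_consecutive_vars_alt (text : String) : String :=
  let segs := PySem.Chars.splitOn text.toList ['_']
  String.ofList (PySem.Chars.join [] (segs.headI :: segs.tail.map (fun s => '_' :: pvFix s)))

-- ===== PRECONDITION & SPEC =====
def Spec_divide_consecutive_vars (text : String) (out : String) : Prop := out = divide_consecutive_vars_alt text
instance (text : String) (out : String) : Decidable (Spec_divide_consecutive_vars text out) := by unfold Spec_divide_consecutive_vars; infer_instance

-- ===== CLAIM (what is proved, stated in full; the proofs are below) =====
def Claim_equal_divide_consecutive_vars : Prop := ∀ (text : String), Dom_divide_consecutive_vars text → Spec_divide_consecutive_vars text (divide_consecutive_vars text)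

-- ===== LEMMAS AND PROOFS =====

-- a reference splitter: pvSplit l = Python l.split('_')
def pvSplit : List Char → List (List Char)
  | [] => [[]]
  | c :: r => if c = '_' then [] :: pvSplit r
              else match pvSplit r with
                   | s :: ss => (c :: s) :: ss
                   | [] => [[c]]

lemma pvSplit_ne_nil (l : List Char) : pvSplit l ≠ [] := by
  cases l with
  | nil => simp [pvSplit]
  | cons c r =>
    simp only [pvSplit]
    split_ifs
    · simp
    · cases h : pvSplit r <;> simp

lemma pvSplitOn_go_eq (fuel : Nat) : ∀ (l cur : List Char) (acc : List (List Char)),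
    l.length ≤ fuel →
    PySem.Chars.splitOn.go ['_'] fuel l cur acc =
      acc.reverse ++ ((cur.reverse ++ (pvSplit l).headI) :: (pvSplit l).tail) := by
  induction fuel with
  | zero =>
    intro l cur acc h
    have : l = [] := by cases l <;> simp_all
    subst this
    simp [PySem.Chars.splitOn.go, pvSplit]
  | succ n ih =>
    intro l cur acc h
    cases l with
    | nil => simp [PySem.Chars.splitOn.go, pvSplit]
    | cons c rest =>
      by_cases hc : c = '_'
      · subst hc
        have hpre : List.isPrefixOf ['_'] ('_' :: rest) = true := by simp [List.isPrefixOf]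
        rw [PySem.Chars.splitOn.go]
        simp only [hpre, if_true]
        rw [ih _ _ _ (by simpa using Nat.le_of_succ_le_succ (by simpa using h))]
        obtain ⟨s, ss, hs⟩ : ∃ s ss, pvSplit rest = s :: ss := by
          cases hr : pvSplit rest with
          | nil => exact absurd hr (pvSplit_ne_nil rest)
          | cons s ss => exact ⟨s, ss, rfl⟩
        simp [pvSplit, hs]
      · rw [PySem.Chars.splitOn.go]
        have hpre : List.isPrefixOf ['_'] (c :: rest) = false := by
          simp [List.isPrefixOf, hc]
          intro h'; exact absurd h'.symm hc
        simp only [hpre, Bool.false_eq_true, if_false]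
        rw [ih _ _ _ (by simpa using Nat.le_of_succ_le_succ (by simpa using h))]
        obtain ⟨s, ss, hs⟩ : ∃ s ss, pvSplit rest = s :: ss := by
          cases hr : pvSplit rest with
          | nil => exact absurd hr (pvSplit_ne_nil rest)
          | cons s ss => exact ⟨s, ss, rfl⟩
        simp [pvSplit, hc, hs]

lemma pvSplitOn_eq (l : List Char) : PySem.Chars.splitOn l ['_'] = pvSplit l := by
  unfold PySem.Chars.splitOn
  rw [pvSplitOn_go_eq (l.length + 1) l [] [] (by omega)]
  obtain ⟨s, ss, hs⟩ : ∃ s ss, pvSplit l = s :: ss := by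
    cases hr : pvSplit l with
    | nil => exact absurd hr (pvSplit_ne_nil l)
    | cons s ss => exact ⟨s, ss, rfl⟩
  simp [hs]

-- join with empty separator, cons step
lemma pvJoin0_cons (x : List Char) (xs : List (List Char)) :
    PySem.Chars.join [] (x :: xs) = x ++ PySem.Chars.join [] xs := by
  simp [PySem.Chars.join, List.intercalate]
  cases xs <;> simp [List.intersperse]

-- the whole tail of segments, each prefixed with '_' and fixed
def pvTail (segs : List (List Char)) : List Char :=
  PySem.Chars.join [] (segs.map (fun s => '_' :: pvFix s))

def pvB (l : List Char) : List Char :=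
  PySem.Chars.join [] ((pvSplit l).headI :: ((pvSplit l).tail.map (fun s => '_' :: pvFix s)))

-- A copies '_'-free characters verbatim
lemma pvCopy (seg : List Char) (rest : List Char) (h : ∀ c ∈ seg, c ≠ '_') :
    divide_consecutive_vars_go (seg ++ rest) = seg ++ divide_consecutive_vars_go rest := by
  induction seg with
  | nil => simp
  | cons c s ih =>
    have hc : c ≠ '_' := h c (by simp)
    rw [List.cons_append, divide_consecutive_vars_go.eq_def]
    simp [hc, ih (fun x hx => h x (by simp [hx]))]

lemma pvDigitRun_eq (s : List Char) :
    pvDigitRun s = (s.takeWhile PySem.Chars.isdigit).length := by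
  induction s with
  | nil => simp [pvDigitRun]
  | cons c r ih =>
    by_cases hd : PySem.Chars.isdigit c <;>
      simp [pvDigitRun, List.takeWhile_cons, hd, ih]

lemma pvDropWhile_head (p : Char → Bool) (l : List Char) (b : Char) (t : List Char)
    (h : l.dropWhile p = b :: t) : p b = false := by
  induction l with
  | nil => simp [List.dropWhile] at h
  | cons c r ih =>
    by_cases hc : p c
    · exact ih (by simpa [List.dropWhile_cons, hc] using h)
    · simp [List.dropWhile_cons, hc] at h
      rw [← h.1]; simpa using hc

lemma pvTWapp (p : Char → Bool) (xs ys : List Char)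
    (h : ∀ a, ys.head? = some a → p a = false) :
    (xs ++ ys).takeWhile p = xs.takeWhile p ∧
      (xs ++ ys).dropWhile p = xs.dropWhile p ++ ys := by
  induction xs with
  | nil =>
    cases ys with
    | nil => simp
    | cons a t =>
      have := h a rfl
      simp [List.takeWhile_cons, List.dropWhile_cons, this]
  | cons c xs ih =>
    by_cases hc : p c <;>
      simp [List.takeWhile_cons, List.dropWhile_cons, hc, ih]

lemma pvTWtd (p : Char → Bool) (l : List Char) :
    l.drop (l.takeWhile p).length = l.dropWhile p ∧
      l.take (l.takeWhile p).length = l.takeWhile p := by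
  induction l with
  | nil => simp
  | cons c r ih =>
    by_cases hc : p c <;>
      simp [List.takeWhile_cons, List.dropWhile_cons, hc, ih]

-- one underscore-segment step of A = the '_' + pvFix of B
lemma pvSegStep (seg rest : List Char) (hseg : ∀ c ∈ seg, c ≠ '_')
    (hrest : ∀ a, rest.head? = some a → a = '_') :
    divide_consecutive_vars_go ('_' :: (seg ++ rest)) =
      '_' :: pvFix seg ++ divide_consecutive_vars_go rest := by
  have husA : PySem.Chars.isalpha '_' = false := by decide
  have husD : PySem.Chars.isdigit '_' = false := by decide
  have hrestD : ∀ a, rest.head? = some a → PySem.Chars.isdigit a = false := by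
    intro a ha; rw [hrest a ha]; exact husD
  have hrestA : ∀ a, rest.head? = some a → PySem.Chars.isalpha a = false := by
    intro a ha; rw [hrest a ha]; exact husA
  rw [divide_consecutive_vars_go.eq_def]
  simp only [if_pos rfl]
  cases seg with
  | nil =>
    simp only [List.nil_append]
    cases rest with
    | nil => simp [pvAStep, pvFix, pvDigitRun]
    | cons a r2 =>
      have ha : a = '_' := hrest a (by simp)
      subst ha
      simp [pvAStep, husA, husD, pvFix, pvDigitRun]
  | cons d s' =>
    have hd_ne : d ≠ '_' := hseg d (by simp)
    by_cases hdig : PySem.Chars.isdigit d = true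
    · -- digit-run branch
      obtain ⟨hTW1, hTW2⟩ := pvTWapp PySem.Chars.isdigit (d :: s') rest hrestD
      have hsegsplit : d :: s' = (d :: s').takeWhile PySem.Chars.isdigit
          ++ (d :: s').dropWhile PySem.Chars.isdigit :=
        (List.takeWhile_append_dropWhile).symm
      have hk : pvDigitRun (d :: s')
          = ((d :: s').takeWhile PySem.Chars.isdigit).length := pvDigitRun_eq _
      have hkpos : 0 < ((d :: s').takeWhile PySem.Chars.isdigit).length := by
        simp [List.takeWhile_cons, hdig]
      have hdrop := (pvTWtd PySem.Chars.isdigit (d :: s')).1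
      have htake := (pvTWtd PySem.Chars.isdigit (d :: s')).2
      have hstep : pvAStep ((d :: s') ++ rest)
          = ((d :: s').takeWhile PySem.Chars.isdigit,
             (d :: s').dropWhile PySem.Chars.isdigit ++ rest) := by
        rw [List.cons_append, pvAStep]
        simp only [← List.cons_append, hdig, if_pos rfl, hTW1, hTW2]
        simp
      rw [hstep]
      cases hs2c : (d :: s').dropWhile PySem.Chars.isdigit with
      | nil =>
        -- segment is all digits; lookahead is rest's head ('_' or nothing)
        have hfix : pvFix (d :: s') = d :: s' := by
          unfold pvFix
          simp only [hk, if_pos hkpos, hdrop, hs2c]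
          simp
        rw [hfix]
        cases hr : rest.head? with
        | none =>
          have : rest = [] := by
            cases rest with
            | nil => rfl
            | cons x t => simp at hr
          subst this
          simp only [hs2c, List.nil_append, List.head?_nil]
          conv_rhs => rw [hsegsplit, hs2c]
          simp
        | some a =>
          simp only [hs2c, List.nil_append, hr, hrestA a hr, Bool.false_eq_true, if_false]
          conv_rhs => rw [hsegsplit, hs2c]
          simp
      | cons b s2' =>
        have hbndig : PySem.Chars.isdigit b = false :=
          pvDropWhile_head PySem.Chars.isdigit (d :: s') b s2' hs2c
        have hs2sub : ∀ c ∈ b :: s2', c ≠ '_' := by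
          intro c hc
          exact hseg c ((List.dropWhile_sublist _).subset (hs2c ▸ hc))
        have hcopy : divide_consecutive_vars_go ((b :: s2') ++ rest)
            = (b :: s2') ++ divide_consecutive_vars_go rest := pvCopy _ rest hs2sub
        simp only [List.cons_append] at hcopy
        rw [hs2c] at hdrop
        by_cases hba : PySem.Chars.isalpha b = true
        · have hfix : pvFix (d :: s')
              = (d :: s').takeWhile PySem.Chars.isdigit ++ ' ' :: (b :: s2') := by
            unfold pvFix
            simp only [hk, if_pos hkpos, hdrop, List.head?_cons, hba, if_true, htake]
          rw [hfix]
          simp [hba, hcopy]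
        · have hfix : pvFix (d :: s') = d :: s' := by
            unfold pvFix
            simp only [hk, if_pos hkpos, hdrop, List.head?_cons, hba, Bool.false_eq_true, if_false]
          have hseg' : d :: s' = (d :: s').takeWhile PySem.Chars.isdigit ++ (b :: s2') := by
            rw [← hs2c]; exact hsegsplit
          rw [hfix]
          simp only [List.cons_append, List.head?_cons, hba, Bool.false_eq_true, if_false, hcopy]
          have hX : d :: (s' ++ divide_consecutive_vars_go rest)
              = (d :: s').takeWhile PySem.Chars.isdigit
                ++ (b :: (s2' ++ divide_consecutive_vars_go rest)) := by
            conv_lhs => rw [← List.cons_append, hseg']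
            simp only [List.append_assoc, List.cons_append]
          rw [hX]
          simp
    · by_cases halp : PySem.Chars.isalpha d = true
      · -- single-letter branch
        have hstep : pvAStep ((d :: s') ++ rest) = ([d], s' ++ rest) := by
          rw [List.cons_append, pvAStep]
          simp [hdig, halp]
        rw [hstep]
        have hdR : pvDigitRun (d :: s') = 0 := by
          simp [pvDigitRun, hdig]
        cases hs' : s' with
        | nil =>
          have hfix : pvFix [d] = [d] := by unfold pvFix; simp [pvDigitRun, hdig]
          rw [hfix]
          cases hr : rest.head? with
          | none =>
            have : rest = [] := by
              cases rest with
              | nil => rfl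
              | cons x t => simp at hr
            subst this; simp
          | some a =>
            simp [hr, hrestA a hr]
        | cons b s'' =>
          have hs'sub : ∀ c ∈ s', c ≠ '_' := fun c hc => hseg c (by simp [hc])
          rw [hs'] at hs'sub
          have hcopy : divide_consecutive_vars_go ((b :: s'') ++ rest)
              = (b :: s'') ++ divide_consecutive_vars_go rest := pvCopy _ rest hs'sub
          simp only [List.cons_append] at hcopy
          by_cases hba : PySem.Chars.isalpha b = true
          · have hfix : pvFix (d :: b :: s'') = d :: ' ' :: b :: s'' := by
              unfold pvFix
              simp [pvDigitRun, hdig, halp, hba]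
            rw [hfix]
            simp [hba, hcopy]
          · have hfix : pvFix (d :: b :: s'') = d :: b :: s'' := by
              unfold pvFix
              simp [pvDigitRun, hdig, halp, hba]
            rw [hfix]
            simp [hba, hcopy]
      · -- neither digit nor letter: nothing is consumed, no space
        have hstep : pvAStep ((d :: s') ++ rest) = ([], (d :: s') ++ rest) := by
          rw [List.cons_append, pvAStep]
          simp [hdig, halp]
        rw [hstep]
        have hcopy : divide_consecutive_vars_go ((d :: s') ++ rest)
            = (d :: s') ++ divide_consecutive_vars_go rest := pvCopy _ rest hseg
        simp only [List.cons_append] at hcopy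
        have hfix : pvFix (d :: s') = d :: s' := by
          unfold pvFix
          simp only [pvDigitRun, hdig, Bool.false_eq_true, if_false, Nat.lt_irrefl]
          cases s' <;> simp [halp]
        rw [hfix]
        simp [halp, hcopy]

lemma pvSplit_decomp (r : List Char) :
    pvSplit r = (r.takeWhile (fun c => c ≠ '_')) ::
      (match r.dropWhile (fun c => c ≠ '_') with
       | [] => ([] : List (List Char))
       | _ :: r2 => pvSplit r2) := by
  induction r with
  | nil => simp [pvSplit]
  | cons c r ih =>
    by_cases hc : c = '_'
    · subst hc
      simp [pvSplit]
    · rw [List.takeWhile_cons, List.dropWhile_cons]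
      simp only [hc, ne_eq, not_false_eq_true, decide_true, if_true]
      simp only [pvSplit, hc, if_false]
      rw [ih]

-- run of A after an underscore = B's treatment of every remaining segment
lemma pvUnderRun : ∀ (r : List Char),
    divide_consecutive_vars_go ('_' :: r) = pvTail (pvSplit r) := by
  intro r
  induction hn : r.length using Nat.strong_induction_on generalizing r with
  | _ n ih =>
    subst hn
    set seg := r.takeWhile (fun c => c ≠ '_') with hseg
    set rest := r.dropWhile (fun c => c ≠ '_') with hrest
    have hsplit : r = seg ++ rest := (List.takeWhile_append_dropWhile).symm
    have hsegfree : ∀ c ∈ seg, c ≠ '_' := by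
      intro c hc
      have := List.mem_takeWhile_imp (hseg ▸ hc)
      simpa using this
    have hresthead : ∀ a, rest.head? = some a → a = '_' := by
      intro a ha
      cases hr : rest with
      | nil => simp [hr] at ha
      | cons b t =>
        rw [hr] at ha; simp at ha
        have := pvDropWhile_head _ r b t (hrest ▸ hr)
        simp at this
        rw [← ha]; exact this
    conv_lhs => rw [hsplit]
    rw [pvSegStep seg rest hsegfree hresthead, pvSplit_decomp r]
    rw [← hseg, ← hrest]
    cases hr : rest with
    | nil =>
      simp [pvTail, PySem.Chars.join, List.intercalate, divide_consecutive_vars_go]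
    | cons b r2 =>
      have hb : b = '_' := hresthead b (by simp [hr])
      subst hb
      have hlen : r2.length < r.length := by
        rw [hsplit, hr]; simp; omega
      rw [ih r2.length (by simpa using hlen) r2 rfl]
      simp [pvTail, pvJoin0_cons]

lemma pvMain (l : List Char) : divide_consecutive_vars_go l = pvB l := by
  induction l with
  | nil => simp [divide_consecutive_vars_go, pvB, pvSplit, PySem.Chars.join, List.intercalate]
  | cons c r ih =>
    by_cases hc : c = '_'
    · subst hc
      rw [pvUnderRun r]
      unfold pvB
      simp only [pvSplit]
      obtain ⟨s, ss, hs⟩ : ∃ s ss, pvSplit r = s :: ss := by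
        cases hq : pvSplit r with
        | nil => exact absurd hq (pvSplit_ne_nil r)
        | cons s ss => exact ⟨s, ss, rfl⟩
      rw [hs, pvJoin0_cons]
      simp [pvTail]
    · rw [divide_consecutive_vars_go.eq_def]
      simp only [hc, if_false]
      rw [ih]
      unfold pvB
      obtain ⟨s, ss, hs⟩ : ∃ s ss, pvSplit r = s :: ss := by
        cases hq : pvSplit r with
        | nil => exact absurd hq (pvSplit_ne_nil r)
        | cons s ss => exact ⟨s, ss, rfl⟩
      simp only [pvSplit, hc, if_false, hs]
      rw [pvJoin0_cons, pvJoin0_cons]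
      simp

-- ===== VERDICT (by name: the statement is the Claim_ definition above) =====
theorem divide_consecutive_vars_spec : Claim_equal_divide_consecutive_vars := by
  intro text _
  unfold Spec_divide_consecutive_vars divide_consecutive_vars divide_consecutive_vars_alt
  rw [pvMain, pvSplitOn_eq]
  rfl
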